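-- pv_equiv track=rewrite | github.com/fsspec/kerchunk | kerchunk/utils.py | templateize
-- ===== SOURCE A (Python) =====
-- import itertools
--
-- def _max_prefix(*strings):
--     # https://stackoverflow.com/a/6719272/3821154
--     def all_same(x):
--         return all(x[0] == y for y in x)
--
--     char_tuples = zip(*strings)
--     prefix_tuples = itertools.takewhile(all_same, char_tuples)
--     return "".join(x[0] for x in prefix_tuples)
--
-- def templateize(strings, min_length=10, template_name="u"):
--     """Make prefix template for a set of strings
--
--     Useful for condensing strings by extracting out a common prefix.
--     If the common prefix is shorted than ``min_length``, the original
--     strings are returned and the output templates are empty.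
--
--     Parameters
--     ----------
--     strings: List[str]
--         inputs
--     min_length: int
--         Only perform transformm if the common prefix is at least this long.
--     template_name: str
--         The placeholder string, should be short.
--
--     Returns
--     -------
--     templates: Dict[str, str], strings: List[str]
--     Such that [s.format(**templates) for s in strings] recreates original strings list
--     """
--     prefix = _max_prefix(*strings)
--     lpref = len(prefix)
--     if lpref >= min_length:
--         template = {template_name: prefix}
--         strings = [("{%s}" % template_name) + s[lpref:] for s in strings]
--     else:
--         template = {}
--     return template, strings
-- ===== SOURCE B (Python) =====
-- def _lcp2(a, b):
--     # common prefix of two strings via a single zip walk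
--     out = []
--     for x, y in zip(a, b):
--         if x != y:
--             break
--         out.append(x)
--     return "".join(out)
--
--
-- def templateize(strings, min_length=10, template_name="u"):
--     if strings:
--         prefix = strings[0]
--         for s in strings[1:]:
--             if not prefix:
--                 break
--             prefix = _lcp2(prefix, s)
--     else:
--         prefix = ""
--     lpref = len(prefix)
--     if lpref >= min_length:
--         template = {template_name: prefix}
--         strings = [("{%s}" % template_name) + s[lpref:] for s in strings]
--     else:
--         template = {}
--     return template, strings
-- ===== Notes on version B (the rewrite author's own statement) =====
-- stated objective: alternative
-- what changed: A computes the common prefix by transposing all strings into columns (zip(*strings)) and take-while-scanning each column; B folds pairwise over the string list, shrinking a running prefix with a two-string lcp and stopping early when it becomes empty.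
import Mathlib
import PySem

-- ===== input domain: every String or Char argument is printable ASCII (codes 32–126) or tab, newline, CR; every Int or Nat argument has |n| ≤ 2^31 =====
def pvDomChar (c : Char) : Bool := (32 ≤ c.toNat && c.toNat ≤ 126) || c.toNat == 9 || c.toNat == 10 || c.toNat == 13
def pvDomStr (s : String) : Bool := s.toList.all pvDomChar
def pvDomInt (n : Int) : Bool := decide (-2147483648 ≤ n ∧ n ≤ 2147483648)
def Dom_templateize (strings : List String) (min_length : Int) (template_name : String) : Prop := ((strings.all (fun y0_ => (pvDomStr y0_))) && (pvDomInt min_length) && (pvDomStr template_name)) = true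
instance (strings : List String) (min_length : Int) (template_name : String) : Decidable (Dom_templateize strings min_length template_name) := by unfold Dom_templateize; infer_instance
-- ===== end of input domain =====

-- B replaces A's n-ary zip/takewhile column scan by a left fold that shrinks a running
-- prefix pairwise over the strings (alternative algorithm, same exact result).

-- ===== PORT A =====
-- all_same(x): all(x[0] == y for y in x)  (x[0] is only evaluated when x is nonempty, so [] ↦ true is exact)
def pvAllSame (col : List Char) : Bool := col.all (fun y => col.headI == y)

-- zip(*strings): the columns of a nonempty family, truncated at the shortest member
def pvColsAux : List Char → List (List Char) → List (List Char)
  | [], _ => []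
  | c :: s', rest =>
    if rest.any (· = []) then []
    else (c :: rest.map List.headI) :: pvColsAux s' (rest.map List.tail)

-- zip(*strings) including the empty family (zip() yields nothing)
def pvZip : List (List Char) → List (List Char)
  | [] => []
  | s :: rest => pvColsAux s rest

def templateize (strings : List String) (min_length : Int) (template_name : String) : (List (String × String)) × List String :=
  -- _max_prefix: "".join(x[0] for x in takewhile(all_same, zip(*strings)))
  let pref : List Char := ((pvZip (strings.map String.toList)).takeWhile pvAllSame).map List.headI
  let lpref : Int := (pref.length : Int)
  if min_length ≤ lpref then
    -- s[lpref:] with lpref = len(prefix) ≥ 0 is exactly drop; "{%s}" % name + … is char concatenation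
    ([(template_name, String.ofList pref)],
     strings.map (fun s => String.ofList ('{' :: template_name.toList ++ '}' :: s.toList.drop pref.length)))
  else ([], strings)

-- ===== PORT B =====
-- _lcp2(a, b): walk zip(a, b), stop at the first mismatch
def pvLcp2 : List Char → List Char → List Char
  | x :: a, y :: b => if x = y then x :: pvLcp2 a b else []
  | _, _ => []

def templateize_alt (strings : List String) (min_length : Int) (template_name : String) : (List (String × String)) × List String :=
  let pref : List Char :=
    match strings with
    | [] => []
    | s :: rest => rest.foldl (fun p t => if p = [] then p else pvLcp2 p t.toList) s.toList
  let lpref : Int := (pref.length : Int)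
  if min_length ≤ lpref then
    ([(template_name, String.ofList pref)],
     strings.map (fun s => String.ofList ('{' :: template_name.toList ++ '}' :: s.toList.drop pref.length)))
  else ([], strings)

-- ===== PRECONDITION & SPEC =====
def Spec_templateize (strings : List String) (min_length : Int) (template_name : String) (out : (List (String × String)) × List String) : Prop := out = templateize_alt strings min_length template_name
instance (strings : List String) (min_length : Int) (template_name : String) (out : (List (String × String)) × List String) : Decidable (Spec_templateize strings min_length template_name out) := by unfold Spec_templateize; infer_instance

-- ===== CLAIM (what is proved, stated in full; the proofs are below) =====
def Claim_equal_templateize : Prop := ∀ (strings : List String) (min_length : Int) (template_name : String), Dom_templateize strings min_length template_name → Spec_templateize strings min_length template_name (templateize strings min_length template_name)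

-- ===== LEMMAS AND PROOFS =====

-- the column scan of a singleton family returns the string itself
lemma scanAux_nil (s : List Char) :
    ((pvColsAux s []).takeWhile pvAllSame).map List.headI = s := by
  induction s with
  | nil => rfl
  | cons c s' ih =>
    simp [pvColsAux, pvAllSame, ih]

-- peeling the second string off the family = shrinking the first by one pairwise lcp step
lemma scanAux_merge (s : List Char) :
    ∀ (t : List Char) (rest : List (List Char)),
      ((pvColsAux s (t :: rest)).takeWhile pvAllSame).map List.headI
        = ((pvColsAux (pvLcp2 s t) rest).takeWhile pvAllSame).map List.headI := by
  induction s with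
  | nil => intro t rest; simp [pvColsAux, pvLcp2]
  | cons c s' ih =>
    intro t rest
    cases t with
    | nil =>
      simp [pvColsAux, pvLcp2]
    | cons d t' =>
      by_cases hr : rest.any (· = []) = true
      · -- some later string is empty: both scans stop at once
        by_cases hcd : c = d
        · simp [pvColsAux, pvLcp2, hr, hcd]
        · simp [pvColsAux, pvLcp2, hr, hcd]
      · by_cases hcd : c = d
        · subst hcd
          by_cases hall : (rest.map List.headI).all (fun y => c == y) = true
          · simp [pvColsAux, pvLcp2, hr, pvAllSame, hall, ih]
          · simp [pvColsAux, pvLcp2, hr, pvAllSame, hall]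
        · simp [pvColsAux, pvLcp2, hr, hcd, pvAllSame]

-- the whole column scan equals B's left fold of pairwise lcps
lemma scan_eq_fold (rest : List (List Char)) :
    ∀ s : List Char,
      ((pvColsAux s rest).takeWhile pvAllSame).map List.headI
        = rest.foldl (fun p t => if p = [] then p else pvLcp2 p t) s := by
  induction rest with
  | nil => intro s; simpa using scanAux_nil s
  | cons t rest' ih =>
    intro s
    have hstep : (if s = [] then s else pvLcp2 s t) = pvLcp2 s t := by
      by_cases h : s = [] <;> simp [h, pvLcp2]
    rw [scanAux_merge s t rest', ih (pvLcp2 s t), List.foldl_cons, hstep]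

-- ===== VERDICT (by name: the statement is the Claim_ definition above) =====
theorem templateize_spec : Claim_equal_templateize := by
  intro strings min_length template_name _
  unfold Spec_templateize templateize templateize_alt
  cases strings with
  | nil => rfl
  | cons s rest =>
    have h := scan_eq_fold (rest.map String.toList) s.toList
    simp only [List.map_cons, pvZip, h, List.foldl_map]
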